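-- pv_equiv track=rewrite | github.com/hammadali1805/webserver | 1stCopy/XX_web_server_ec1.py | is_valid_http_request
-- ===== SOURCE A (Python) =====
-- def is_valid_http_request(request):
--     """
--     Validates the given HTTP request.
--     Returns True if the request is valid, False otherwise.
--     """
--     try:
--         # Split the request into its parts
--         parts = request.split('\r\n\r\n')
--         headers = parts[0].split('\r\n')
--         body = parts[1] if len(parts) > 1 else None
--     except:
--         return False
--
--     # Validate the request line
--     if not headers[0].startswith('GET ') and not headers[0].startswith('POST '):
--         return False
--
--     # Validate the GET Request
--     if headers[0].startswith('GET '):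
--
--         # Check that the "Host" header is present and has a value
--         host_header = [line for line in headers  if line.startswith('Host: ')]
--         if not host_header or len(host_header) > 1 or not host_header[0][6:]:
--             return False
--
--         # Check that the "User-Agent" header is present and has a value
--         user_agent_header = [line for line in headers if line.startswith('User-Agent: ')]
--         if not user_agent_header or len(user_agent_header) > 1 or not user_agent_header[0][12:]:
--             return False
--
--         # Check that the "Accept" header is present and has a value
--         accept_header = [line for line in headers if line.startswith('Accept: ')]
--         if not accept_header or len(accept_header) > 1 or not accept_header[0][8:]:
--             return False
--
--         # Check that the "Accept-Language" header is present and has a value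
--         accept_language_header = [line for line in headers if line.startswith('Accept-Language: ')]
--         if not accept_language_header or len(accept_language_header) > 1 or not accept_language_header[0][17:]:
--             return False
--
--         # Check that the "Connection" header is present and has a value
--         connection_header = [line for line in headers if line.startswith('Connection: ')]
--         if not connection_header or len(connection_header) > 1 or not connection_header[0][12:]:
--             return False
--
--     # Validate the POST Request
--     if headers[0].startswith('POST '):
--
--         # Check that the "Host" header is present and has a value
--         host_header = [line for line in headers  if line.startswith('Host: ')]
--         if not host_header or len(host_header) > 1 or not host_header[0][6:]:
--             return False
--
--         # Check that the "User-Agent" header is present and has a value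
--         user_agent_header = [line for line in headers if line.startswith('User-Agent: ')]
--         if not user_agent_header or len(user_agent_header) > 1 or not user_agent_header[0][12:]:
--             return False
--
--         # Check that the "Content-Type" header is present and has a value
--         content_type_header = [line for line in headers if line.startswith('Content-Type: ')]
--         if not content_type_header or len(content_type_header) > 1 or not content_type_header[0][14:]:
--             return False
--
--         # Check that the "Content-Length" header is present and has a value
--         content_length_header = [line for line in headers if line.startswith('Content-Length: ')]
--         if not content_length_header or len(content_length_header) > 1 or not content_length_header[0][16:]:
--             return False
--
--         #Check that the "Content-Length" header has a integral value
--         for line in headers: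
--             if line.startswith('Content-Length: '):
--                 try:
--                     int(line[16:])
--                 except:
--                     return False
--
--     # The request is valid
--     return True
-- ===== SOURCE B (Python) =====
-- def is_valid_http_request(request):
--     """
--     Validates the given HTTP request.
--     Returns True if the request is valid, False otherwise.
--     Single pass over the header lines building a name -> list-of-values table,
--     then one rule checked per required header name.
--     """
--     parts = request.split('\r\n\r\n')
--     headers = parts[0].split('\r\n')
--     first = headers[0]
--     get = first.startswith('GET ')
--     post = first.startswith('POST ')
--     if not get and not post:
--         return False
--
--     # name -> list of values, splitting each line at its first ': '
--     pairs = []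
--     for line in headers:
--         key, sep, value = line.partition(': ')
--         if sep:
--             pairs.append((key, value))
--     table = {}
--     for key, value in pairs:
--         table[key] = table.get(key, []) + [value]
--
--     if get:
--         required = ['Host', 'User-Agent', 'Accept', 'Accept-Language', 'Connection']
--     else:
--         required = ['Host', 'User-Agent', 'Content-Type', 'Content-Length']
--     for name in required:
--         values = table.get(name, [])
--         if len(values) != 1 or not values[0]:
--             return False
--
--     if post:
--         try:
--             int(table['Content-Length'][0])
--         except ValueError:
--             return False
--     return True
-- ===== Notes on version B (the rewrite author's own statement) =====
-- stated objective: simpler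
-- what changed: A runs a separate filter pass over the header lines for each required header name (plus one more loop for the Content-Length int check); B makes one pass that splits every line at its first colon-space separator into a name -> list-of-values table and then checks a single rule per required name against that table.
import Mathlib
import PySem

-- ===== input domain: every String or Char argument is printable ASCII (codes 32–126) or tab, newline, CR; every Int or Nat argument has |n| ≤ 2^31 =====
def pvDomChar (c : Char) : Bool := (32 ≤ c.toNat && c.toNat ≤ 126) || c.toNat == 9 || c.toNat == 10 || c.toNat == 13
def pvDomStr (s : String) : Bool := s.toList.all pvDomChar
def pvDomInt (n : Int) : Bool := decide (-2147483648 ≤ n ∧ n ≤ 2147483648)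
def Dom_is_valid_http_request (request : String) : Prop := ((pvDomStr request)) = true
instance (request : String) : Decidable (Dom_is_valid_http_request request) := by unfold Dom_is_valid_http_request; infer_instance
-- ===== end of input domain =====

-- B replaces A's five/four filter passes over the header lines by ONE pass that splits each
-- line at its first ': ' into a name → list-of-values table, then checks one rule per
-- required name (objective: simpler).

-- ===== PORT A =====

/-- A's repeated per-header block: the comprehension `[line for line in headers if
    line.startswith(pre)]` followed by `not xs or len(xs) > 1 or not xs[0][k:]` in A's order. -/
def pvHeaderCheckA (headers : List String) (pre : String) (k : Int) : Bool :=
  let ms := headers.filter (fun line => PySem.Str.startswith line pre)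
  if ms.isEmpty then false
  else if ms.length > 1 then false
  else !(PySem.Str.slice (ms.headD "") (some k) none == "")

def is_valid_http_request (request : String) : Bool :=
  -- try: parts = request.split('\r\n\r\n'); headers = parts[0].split('\r\n')  (body is unused)
  match PySem.Str.split? request "\r\n\r\n" with
  | none => false          -- except: (unreachable, the separator is nonempty)
  | some parts =>
  match PySem.List.pyGet? parts 0 with
  | none => false          -- except: IndexError from parts[0] (unreachable, split is nonempty)
  | some p0 =>
  match PySem.Str.split? p0 "\r\n" with
  | none => false          -- unreachable, the separator is nonempty
  | some headers =>
  match PySem.List.pyGet? headers 0 with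
  | none => false          -- headers[0]: unreachable, split is nonempty
  | some h0 =>
  if !PySem.Str.startswith h0 "GET " && !PySem.Str.startswith h0 "POST " then false
  else if PySem.Str.startswith h0 "GET " &&
      !(pvHeaderCheckA headers "Host: " 6 && pvHeaderCheckA headers "User-Agent: " 12 &&
        pvHeaderCheckA headers "Accept: " 8 && pvHeaderCheckA headers "Accept-Language: " 17 &&
        pvHeaderCheckA headers "Connection: " 12) then false
  else if PySem.Str.startswith h0 "POST " &&
      !(pvHeaderCheckA headers "Host: " 6 && pvHeaderCheckA headers "User-Agent: " 12 &&
        pvHeaderCheckA headers "Content-Type: " 14 && pvHeaderCheckA headers "Content-Length: " 16 &&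
        -- for line in headers: if line.startswith('Content-Length: '): int(line[16:]) must parse
        headers.all (fun line => !PySem.Str.startswith line "Content-Length: " ||
          (PySem.Int.ofStr? (PySem.Str.slice line (some 16) none)).isSome)) then false
  else true

-- ===== PORT B =====

/-- Hand port of Python's `line.partition(': ')` as B uses it: `some (key, value)` splitting at
    the FIRST occurrence of `': '`, `none` when `': '` does not occur (`sep == ''`). Exact. -/
def pvPartition : List Char → Option (List Char × List Char)
  | c :: d :: rest =>
    if c = ':' ∧ d = ' ' then some ([], rest)
    else (pvPartition (d :: rest)).map (fun kv => (c :: kv.1, kv.2))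
  | _ => none

/-- B's per-name rule: `len(values) != 1 or not values[0]` fails the check. -/
def pvCheckB (table : PySem.Dict String (List String)) (name : String) : Bool :=
  let values := table.getD name []
  values.length == 1 && !(values.headD "" == "")

def is_valid_http_request_alt (request : String) : Bool :=
  match PySem.Str.split? request "\r\n\r\n" with
  | none => false          -- unreachable, the separator is nonempty
  | some parts =>
  match PySem.List.pyGet? parts 0 with
  | none => false          -- unreachable, split is nonempty
  | some p0 =>
  match PySem.Str.split? p0 "\r\n" with
  | none => false          -- unreachable, the separator is nonempty
  | some headers =>
  match PySem.List.pyGet? headers 0 with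
  | none => false          -- unreachable, split is nonempty
  | some first =>
  let get := PySem.Str.startswith first "GET "
  let post := PySem.Str.startswith first "POST "
  if !get && !post then false
  else
    let pairs := headers.filterMap (fun line =>
      (pvPartition line.toList).map (fun kv => (String.ofList kv.1, String.ofList kv.2)))
    let table := pairs.foldl (fun d p => d.modify p.1 [] (· ++ [p.2])) PySem.Dict.empty
    let required := if get then ["Host", "User-Agent", "Accept", "Accept-Language", "Connection"]
                    else ["Host", "User-Agent", "Content-Type", "Content-Length"]
    required.all (fun name => pvCheckB table name) &&
      (!post || (PySem.Int.ofStr? ((table.getD "Content-Length" []).headD "")).isSome)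

-- ===== PRECONDITION & SPEC =====
def Spec_is_valid_http_request (request : String) (out : Bool) : Prop := out = is_valid_http_request_alt request
instance (request : String) (out : Bool) : Decidable (Spec_is_valid_http_request request out) := by unfold Spec_is_valid_http_request; infer_instance

-- ===== CLAIM (what is proved, stated in full; the proofs are below) =====
def Claim_equal_is_valid_http_request : Prop := ∀ (request : String), Dom_is_valid_http_request request → Spec_is_valid_http_request request (is_valid_http_request request)

-- ===== LEMMAS AND PROOFS =====

-- partition finds the ': ' a startswith-match puts there
lemma pvPartition_append (n : List Char) (rest : List Char) (hc : ':' ∉ n) :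
    pvPartition (n ++ ':' :: ' ' :: rest) = some (n, rest) := by
  induction n with
  | nil => simp [pvPartition]
  | cons c cs ih =>
    have hc' : c ≠ ':' := fun h => hc (by simp [h])
    have hcs : ':' ∉ cs := fun h => hc (List.mem_cons_of_mem _ h)
    cases cs with
    | nil => simp [pvPartition, hc']
    | cons d ds =>
      have hne : ¬(c = ':' ∧ d = ' ') := fun h => hc' h.1
      simp only [List.cons_append, pvPartition, if_neg hne]
      have ih' := ih hcs
      simp only [List.cons_append] at ih'
      rw [ih']
      rfl

-- partition only returns what it found
lemma pvPartition_sound : ∀ (l k v : List Char), pvPartition l = some (k, v) → l = k ++ ':' :: ' ' :: v := by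
  intro l
  induction l with
  | nil => intro k v h; simp [pvPartition] at h
  | cons c rest ih =>
    intro k v h
    cases rest with
    | nil => simp [pvPartition] at h
    | cons d ds =>
      by_cases hcd : c = ':' ∧ d = ' '
      · rw [pvPartition, if_pos hcd] at h
        obtain ⟨h1, h2⟩ := Prod.mk.injEq .. ▸ Option.some.injEq .. ▸ h
        simp [← h1, ← h2, hcd.1, hcd.2]
      · rw [pvPartition, if_neg hcd] at h
        simp only [Option.map_eq_some_iff] at h
        obtain ⟨⟨k', v'⟩, hp, he⟩ := h
        cases he
        rw [List.cons_append]
        exact congrArg (c :: ·) (ih k' v' hp)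

-- per line, one direction: a startswith-match partitions into (n, the rest)
lemma pvKey_of_startswith (n l : List Char) (hc : ':' ∉ n)
    (hs : PySem.Chars.startswith l (n ++ [':', ' ']) = true) :
    pvPartition l = some (n, l.drop (n.length + 2)) := by
  obtain ⟨t, ht⟩ := (PySem.Chars.startswith_iff l (n ++ [':', ' '])).mp hs
  have hl : l = n ++ ':' :: ' ' :: t := by rw [← ht]; simp
  subst hl
  rw [pvPartition_append n t hc]
  have hdrop : (n ++ ':' :: ' ' :: t).drop (n.length + 2) = t := by
    rw [show n ++ ':' :: ' ' :: t = (n ++ [':', ' ']) ++ t by simp, List.drop_left' (by simp)]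
  rw [hdrop]

-- per line, the other direction: key n can only come from a startswith-match
lemma pvStartswith_of_key (n l v : List Char) (hp : pvPartition l = some (n, v)) :
    PySem.Chars.startswith l (n ++ [':', ' ']) = true ∧ v = l.drop (n.length + 2) := by
  have hl : l = n ++ ':' :: ' ' :: v := pvPartition_sound l n v hp
  subst hl
  constructor
  · rw [PySem.Chars.startswith_iff]
    exact ⟨v, by simp⟩
  · rw [show n ++ ':' :: ' ' :: v = (n ++ [':', ' ']) ++ v by simp, List.drop_left' (by simp)]

lemma pvOfList_eq_iff (k : List Char) (n : String) : String.ofList k = n ↔ k = n.toList := by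
  constructor
  · intro h; rw [← h, String.toList_ofList]
  · intro h; subst h; exact String.ofList_toList

-- the values listed under n in B's table are A's matched lines with the prefix cut off
lemma pvVals_eq (n pre : String) (hp : pre.toList = n.toList ++ [':', ' ']) (hc : ':' ∉ n.toList)
    (headers : List String) :
    (List.filter (fun p => p.1 == n)
        (headers.filterMap (fun line =>
          (pvPartition line.toList).map (fun kv => (String.ofList kv.1, String.ofList kv.2))))).map (fun x => x.2)
      = (headers.filter (fun l => PySem.Str.startswith l pre)).map
          (fun l => String.ofList (l.toList.drop (n.toList.length + 2))) := by
  induction headers with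
  | nil => rfl
  | cons l hs ih =>
    cases hpl : pvPartition l.toList with
    | none =>
      have hsw : PySem.Str.startswith l pre = false := by
        rw [PySem.Str.startswith_eq, hp]
        by_contra hcon
        rw [Bool.not_eq_false] at hcon
        have := pvKey_of_startswith n.toList l.toList hc hcon
        rw [hpl] at this
        cases this
      have hsw2 : PySem.Chars.startswith l.toList pre.toList = false := by
        rw [← PySem.Str.startswith_eq]; exact hsw
      simp [hpl, hsw2, ih]
    | some kv =>
      obtain ⟨k, v⟩ := kv
      by_cases hk : k = n.toList
      · rw [hk] at hpl
        obtain ⟨hsw', hv⟩ := pvStartswith_of_key n.toList l.toList v hpl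
        have hsw : PySem.Str.startswith l pre = true := by
          rw [PySem.Str.startswith_eq, hp]; exact hsw'
        have hsw2 : PySem.Chars.startswith l.toList pre.toList = true := by
          rw [hp]; exact hsw'
        simp [hpl, hsw2, hv, ih]
      · have hsw : PySem.Str.startswith l pre = false := by
          rw [PySem.Str.startswith_eq, hp]
          by_contra hcon
          rw [Bool.not_eq_false] at hcon
          have := pvKey_of_startswith n.toList l.toList hc hcon
          rw [hpl] at this
          exact hk (congrArg Prod.fst (Option.some.inj this))
        have hbeq : (String.ofList k == n) = false := by
          rw [beq_eq_false_iff_ne]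
          intro h
          exact hk ((pvOfList_eq_iff k n).mp h)
        have hsw2 : PySem.Chars.startswith l.toList pre.toList = false := by
          rw [← PySem.Str.startswith_eq]; exact hsw
        simp [hpl, hsw2, hbeq, ih]

lemma pvSlice_eq (m : String) (k : Int) (hk0 : 0 ≤ k) :
    PySem.Str.slice m (some k) none = String.ofList (m.toList.drop k.toNat) := by
  calc PySem.Str.slice m (some k) none
      = String.ofList ((PySem.Str.slice m (some k) none).toList) := String.ofList_toList.symm
    _ = _ := by
        rw [PySem.Str.toList_slice, PySem.Chars.slice_eq_listSlice, PySem.List.slice_from _ hk0]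

-- B's table lookup, rule applied = A's filter pass, rule applied (one required name)
lemma pvCheck_eq (n pre : String) (k : Int) (hp : pre.toList = n.toList ++ [':', ' '])
    (hk : k = (n.toList.length : Int) + 2) (hc : ':' ∉ n.toList) (headers : List String) :
    pvCheckB (List.foldl (fun d p => d.modify p.1 [] (· ++ [p.2])) PySem.Dict.empty
        (headers.filterMap (fun line =>
          (pvPartition line.toList).map (fun kv => (String.ofList kv.1, String.ofList kv.2))))) n
      = pvHeaderCheckA headers pre k := by
  have htab := PySem.Dict.getD_foldl_modify_append
    (headers.filterMap (fun line =>
      (pvPartition line.toList).map (fun kv => (String.ofList kv.1, String.ofList kv.2))))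
    (PySem.Dict.empty) n
  rw [PySem.Dict.getD_empty, List.nil_append, pvVals_eq n pre hp hc headers] at htab
  have hkt : k.toNat = n.toList.length + 2 := by omega
  have hk0 : (0 : Int) ≤ k := by omega
  unfold pvCheckB pvHeaderCheckA
  rw [htab]
  cases hms : headers.filter (fun l => PySem.Str.startswith l pre) with
  | nil => simp
  | cons m tail =>
    cases tail with
    | nil =>
      simp only [List.map_cons, List.map_nil, List.length_cons, List.length_nil, List.headD_cons,
        List.isEmpty_cons]
      rw [pvSlice_eq m k hk0, hkt]
      simp
    | cons m2 tail2 => simp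

-- when headers.filter p = [m], A's final loop over headers is just its check at m
lemma pvAll_filter_single (p P : String → Bool) (xs : List String) (m : String)
    (h : xs.filter p = [m]) : (xs.all fun x => !p x || P x) = P m := by
  induction xs with
  | nil => simp at h
  | cons x xs ih =>
    rw [List.filter_cons] at h
    by_cases hx : p x = true
    · rw [if_pos hx] at h
      have h1 : x = m := (List.cons_eq_cons.mp h).1
      have h2 : xs.filter p = [] := (List.cons_eq_cons.mp h).2
      subst h1
      have hall : xs.all (fun x => !p x || P x) = true := by
        rw [List.all_eq_true]
        intro y hy
        have hpy : p y = false := by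
          have := List.filter_eq_nil_iff.mp h2 y hy
          simpa using this
        simp [hpy]
      simp [List.all_cons, hx, hall]
    · have hx' : p x = false := by simpa using hx
      rw [if_neg (by simp [hx'])] at h
      simp [List.all_cons, hx', ih h]

-- a passed Content-Length count check pins the filter down to one line
lemma pvFilter_single (headers : List String) (pre : String) (k : Int)
    (h : pvHeaderCheckA headers pre k = true) :
    ∃ m, headers.filter (fun l => PySem.Str.startswith l pre) = [m] := by
  unfold pvHeaderCheckA at h
  cases hms : headers.filter (fun l => PySem.Str.startswith l pre) with
  | nil => rw [hms] at h; simp at h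
  | cons m tail =>
    cases tail with
    | nil => exact ⟨m, rfl⟩
    | cons m2 tail2 => rw [hms] at h; simp at h

-- with exactly one Content-Length line, A's int() loop = B's parse of the stored value
lemma pvCL_eq (headers : List String)
    (h4 : pvHeaderCheckA headers "Content-Length: " 16 = true) :
    (headers.all (fun line => !PySem.Str.startswith line "Content-Length: " ||
        (PySem.Int.ofStr? (PySem.Str.slice line (some 16) none)).isSome))
      = (PySem.Int.ofStr? (((List.foldl (fun d p => d.modify p.1 [] (· ++ [p.2])) PySem.Dict.empty
          (headers.filterMap (fun line =>
            (pvPartition line.toList).map (fun kv => (String.ofList kv.1, String.ofList kv.2))))).getD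
          "Content-Length" []).headD "")).isSome := by
  obtain ⟨m, hm⟩ := pvFilter_single headers "Content-Length: " 16 h4
  have htab := PySem.Dict.getD_foldl_modify_append
    (headers.filterMap (fun line =>
      (pvPartition line.toList).map (fun kv => (String.ofList kv.1, String.ofList kv.2))))
    (PySem.Dict.empty) "Content-Length"
  rw [PySem.Dict.getD_empty, List.nil_append,
    pvVals_eq "Content-Length" "Content-Length: " (by decide) (by decide) headers, hm] at htab
  rw [htab]
  rw [pvAll_filter_single _ _ headers m hm]
  rw [pvSlice_eq m 16 (by omega), PySem.Int.ofStr?.eq_1, PySem.Int.ofStr?.eq_1]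
  simp

-- a request line cannot start with both 'GET ' and 'POST '
lemma pvNotBoth (s : String) (h1 : PySem.Str.startswith s "GET " = true)
    (h2 : PySem.Str.startswith s "POST " = true) : False := by
  rw [PySem.Str.startswith_eq, PySem.Chars.startswith_iff] at h1 h2
  obtain ⟨t1, e1⟩ := h1
  obtain ⟨t2, e2⟩ := h2
  rw [show "GET ".toList = 'G' :: 'E' :: 'T' :: ' ' :: [] from rfl] at e1
  rw [show "POST ".toList = 'P' :: 'O' :: 'S' :: 'T' :: ' ' :: [] from rfl] at e2
  rw [← e1] at e2
  simp at e2

-- ===== VERDICT (by name: the statement is the Claim_ definition above) =====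
theorem is_valid_http_request_spec : Claim_equal_is_valid_http_request := by
  intro request _
  unfold Spec_is_valid_http_request is_valid_http_request is_valid_http_request_alt
  cases h1 : PySem.Str.split? request "\r\n\r\n" with
  | none => rfl
  | some parts =>
  dsimp only
  cases h2 : PySem.List.pyGet? parts 0 with
  | none => rfl
  | some p0 =>
  dsimp only
  cases h3 : PySem.Str.split? p0 "\r\n" with
  | none => rfl
  | some headers =>
  dsimp only
  cases h4 : PySem.List.pyGet? headers 0 with
  | none => rfl
  | some h0 =>
  dsimp only
  have e1 := pvCheck_eq "Host" "Host: " 6 (by decide) (by decide) (by decide) headers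
  have e2 := pvCheck_eq "User-Agent" "User-Agent: " 12 (by decide) (by decide) (by decide) headers
  have e3 := pvCheck_eq "Accept" "Accept: " 8 (by decide) (by decide) (by decide) headers
  have e4 := pvCheck_eq "Accept-Language" "Accept-Language: " 17 (by decide) (by decide) (by decide) headers
  have e5 := pvCheck_eq "Connection" "Connection: " 12 (by decide) (by decide) (by decide) headers
  have e6 := pvCheck_eq "Content-Type" "Content-Type: " 14 (by decide) (by decide) (by decide) headers
  have e7 := pvCheck_eq "Content-Length" "Content-Length: " 16 (by decide) (by decide) (by decide) headers
  cases hG : PySem.Str.startswith h0 "GET " with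
  | false =>
    cases hP : PySem.Str.startswith h0 "POST " with
    | false => simp
    | true =>
      by_cases hc4 : pvHeaderCheckA headers "Content-Length: " 16 = true
      · have hcl := pvCL_eq headers hc4
        simp only [List.all_cons, List.all_nil, Bool.not_false, Bool.not_true,
          Bool.false_and, Bool.and_false, Bool.and_true, Bool.true_and, Bool.false_or,
          Bool.false_eq_true, if_false]
        rw [e1, e2, e6, e7, ← hcl, hc4]
        cases pvHeaderCheckA headers "Host: " 6 <;>
          cases pvHeaderCheckA headers "User-Agent: " 12 <;>
            cases pvHeaderCheckA headers "Content-Type: " 14 <;>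
              cases headers.all (fun line => !PySem.Str.startswith line "Content-Length: " ||
                (PySem.Int.ofStr? (PySem.Str.slice line (some 16) none)).isSome) <;>
                simp
      · have hc4' : pvHeaderCheckA headers "Content-Length: " 16 = false := by
          simpa using hc4
        simp only [List.all_cons, List.all_nil, Bool.not_false, Bool.not_true,
          Bool.false_and, Bool.and_false, Bool.and_true, Bool.true_and, Bool.false_or,
          Bool.false_eq_true, if_false]
        rw [e1, e2, e6, e7, hc4']
        simp
  | true =>
    have hP : PySem.Str.startswith h0 "POST " = false := by
      cases hPc : PySem.Str.startswith h0 "POST " with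
      | false => rfl
      | true => exact absurd (pvNotBoth h0 hG hPc) (by simp)
    simp only [hP, List.all_cons, List.all_nil, Bool.not_false, Bool.not_true,
      Bool.false_and, Bool.and_true, Bool.true_and,
      Bool.false_eq_true, if_false, if_true]
    rw [e1, e2, e3, e4, e5]
    cases pvHeaderCheckA headers "Host: " 6 <;>
      cases pvHeaderCheckA headers "User-Agent: " 12 <;>
        cases pvHeaderCheckA headers "Accept: " 8 <;>
          cases pvHeaderCheckA headers "Accept-Language: " 17 <;>
            cases pvHeaderCheckA headers "Connection: " 12 <;>
              simp
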